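-- pv_equiv track=rewrite | github.com/razbenaharon/ScalpelLab | SimCLR_reid/visualize_simclr_dataset.py | analyze_bursts
-- ===== SOURCE A (Python) =====
-- def analyze_bursts(frame_ids_by_case_video: dict) -> dict:
--     """
--     Analyze burst patterns in the dataset.
--
--     A burst is expected to be 3 images with ~20 frame gaps.
--     """
--     total_bursts = 0
--     complete_bursts = 0  # Exactly 3 images
--     incomplete_bursts = 0
--
--     for (case_no, video_idx), frame_ids in frame_ids_by_case_video.items():
--         if not frame_ids:
--             continue
--
--         # Sort frame IDs and group into bursts
--         sorted_frames = sorted(frame_ids)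
--
--         # Simple heuristic: count how many groups of 3 we have
--         # Images in a burst should be ~20-40 frames apart
--         # Images between bursts should be 750+ frames apart
--
--         burst_count = 0
--         i = 0
--         while i < len(sorted_frames):
--             # Start of potential burst
--             burst_frames = [sorted_frames[i]]
--             j = i + 1
--
--             # Collect frames that are close together (part of same burst)
--             while j < len(sorted_frames):
--                 gap = sorted_frames[j] - sorted_frames[j - 1]
--                 if gap < 100:  # Within burst (expect ~20-40 frame gaps)
--                     burst_frames.append(sorted_frames[j])
--                     j += 1
--                 else:
--                     break  # Large gap = new burst
--
--             if len(burst_frames) == 3: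
--                 complete_bursts += 1
--             else:
--                 incomplete_bursts += 1
--
--             burst_count += 1
--             i = j
--
--         total_bursts += burst_count
--
--     return {
--         'total_bursts': total_bursts,
--         'complete_bursts': complete_bursts,
--         'incomplete_bursts': incomplete_bursts
--     }
-- ===== SOURCE B (Python) =====
-- def analyze_bursts(frame_ids_by_case_video: dict) -> dict:
--     """Count bursts arithmetically from the boundary pattern of big gaps:
--     bursts = number of big-gap markers minus 1; complete bursts = occurrences of
--     the window [big, small, small, big]; incomplete = total - complete."""
--     total_bursts = 0
--     complete_bursts = 0
--     for frames in frame_ids_by_case_video.values():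
--         if not frames:
--             continue
--         s = sorted(frames)
--         big = [True] + [b - a >= 100 for a, b in zip(s, s[1:])] + [True]
--         total_bursts += sum(big) - 1
--         complete_bursts += sum(1 for a, b, c, d in zip(big, big[1:], big[2:], big[3:])
--                                if a and not b and not c and d)
--     return {
--         'total_bursts': total_bursts,
--         'complete_bursts': complete_bursts,
--         'incomplete_bursts': total_bursts - complete_bursts
--     }
-- ===== Notes on version B (the rewrite author's own statement) =====
-- stated objective: alternative
-- what changed: B never builds bursts or run lengths at all: it derives the counts arithmetically from the boolean gap pattern - total bursts = number of big-gap boundary markers minus 1, complete bursts = occurrences of the fixed window [big, small, small, big], incomplete = total - complete - whereas A walks the sorted list with nested index loops collecting each burst's frames.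
import Mathlib
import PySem

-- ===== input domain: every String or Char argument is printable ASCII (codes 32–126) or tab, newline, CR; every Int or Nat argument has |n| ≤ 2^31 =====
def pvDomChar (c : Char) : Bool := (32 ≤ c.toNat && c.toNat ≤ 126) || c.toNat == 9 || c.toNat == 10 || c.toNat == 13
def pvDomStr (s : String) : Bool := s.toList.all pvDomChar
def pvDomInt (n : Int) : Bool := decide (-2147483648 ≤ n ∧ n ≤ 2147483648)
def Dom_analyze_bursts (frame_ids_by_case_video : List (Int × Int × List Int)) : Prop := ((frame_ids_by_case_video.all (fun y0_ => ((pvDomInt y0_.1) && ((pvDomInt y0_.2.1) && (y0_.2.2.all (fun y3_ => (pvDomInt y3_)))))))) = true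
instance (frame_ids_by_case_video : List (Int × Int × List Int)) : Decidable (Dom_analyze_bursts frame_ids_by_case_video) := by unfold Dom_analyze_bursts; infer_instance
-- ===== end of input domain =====

-- B drops A's run construction entirely: it counts big-gap boundary markers (bursts =
-- markers - 1) and occurrences of the fixed window [big, small, small, big] (complete
-- bursts), with incomplete = total - complete (objective: alternative decomposition).
-- The dict parameter arrives as an association list; both ports rebuild the Python dict
-- (insert with overwrite) before iterating, mirroring dict iteration.

-- ===== PORT A =====
-- inner while loop: number of frames appended to burst_frames (gap < 100), and remainder
def pvCollectA (prev : Int) : List Int → Nat × List Int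
  | [] => (0, [])
  | x :: xs =>
    if x - prev < 100 then
      let p := pvCollectA x xs
      (p.1 + 1, p.2)
    else (0, x :: xs)

theorem pvCollectA_len : ∀ (l : List Int) (prev : Int), (pvCollectA prev l).2.length ≤ l.length
  | [], _ => Nat.le_refl _
  | x :: xs, prev => by
    simp only [pvCollectA]
    split
    · exact Nat.le_succ_of_le (pvCollectA_len xs x)
    · exact Nat.le_refl _

-- outer while loop over sorted_frames, carrying (burst_count, complete, incomplete)
def pvLoopA : List Int → Int → Int → Int → Int × Int × Int
  | [], bc, comp, inc => (bc, comp, inc)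
  | x :: xs, bc, comp, inc =>
    let p := pvCollectA x xs
    pvLoopA p.2 (bc + 1)
      (if p.1 + 1 = 3 then comp + 1 else comp)
      (if p.1 + 1 = 3 then inc else inc + 1)
termination_by l => l.length
decreasing_by exact Nat.lt_succ_of_le (pvCollectA_len _ _)

def analyze_bursts (frame_ids_by_case_video : List (Int × Int × List Int)) : List (String × Int) :=
  let d : PySem.Dict (Int × Int) (List Int) :=
    frame_ids_by_case_video.foldl (fun d kv => d.insert (kv.1, kv.2.1) kv.2.2) PySem.Dict.empty
  let st : Int × Int × Int :=
    d.items.foldl (fun st kv =>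
      if kv.2 = [] then st
      else
        let s := PySem.List.sorted kv.2 (fun x => x) false
        let r := pvLoopA s 0 st.2.1 st.2.2
        (st.1 + r.1, r.2.1, r.2.2)) (0, 0, 0)
  [("total_bursts", st.1), ("complete_bursts", st.2.1), ("incomplete_bursts", st.2.2)]

-- ===== PORT B =====
-- big = [True] + [b - a >= 100 for a, b in zip(s, s[1:])] + [True];
-- total += sum(big) - 1; complete += pattern count over zip(big, big[1:], big[2:], big[3:])
def analyze_bursts_alt (frame_ids_by_case_video : List (Int × Int × List Int)) : List (String × Int) :=
  let d : PySem.Dict (Int × Int) (List Int) :=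
    frame_ids_by_case_video.foldl (fun d kv => d.insert (kv.1, kv.2.1) kv.2.2) PySem.Dict.empty
  let st : Int × Int :=
    d.items.foldl (fun st kv =>
      if kv.2 = [] then st
      else
        let s := PySem.List.sorted kv.2 (fun x => x) false
        let big : List Bool := true :: (s.zip s.tail).map (fun pr => decide (pr.2 - pr.1 ≥ 100)) ++ [true]
        (st.1 + ((big.countP id : Nat) : Int) - 1,
         st.2 + ((((big.zip (big.drop 1)).zip ((big.drop 2).zip (big.drop 3))).countP
                    (fun q => q.1.1 && !q.1.2 && !q.2.1 && q.2.2) : Nat) : Int))) (0, 0)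
  [("total_bursts", st.1), ("complete_bursts", st.2), ("incomplete_bursts", st.1 - st.2)]

-- ===== PRECONDITION & SPEC =====
def Spec_analyze_bursts (frame_ids_by_case_video : List (Int × Int × List Int)) (out : List (String × Int)) : Prop := out = analyze_bursts_alt frame_ids_by_case_video
instance (frame_ids_by_case_video : List (Int × Int × List Int)) (out : List (String × Int)) : Decidable (Spec_analyze_bursts frame_ids_by_case_video out) := by unfold Spec_analyze_bursts; infer_instance

-- ===== CLAIM (what is proved, stated in full; the proofs are below) =====
def Claim_equal_analyze_bursts : Prop := ∀ (frame_ids_by_case_video : List (Int × Int × List Int)), Dom_analyze_bursts frame_ids_by_case_video → Spec_analyze_bursts frame_ids_by_case_video (analyze_bursts frame_ids_by_case_video)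

-- ===== LEMMAS AND PROOFS =====

-- the run lengths A's recursion walks through (proof-only object)
def pvRuns : List Int → List Nat
  | [] => []
  | x :: xs =>
    let p := pvCollectA x xs
    (p.1 + 1) :: pvRuns p.2
termination_by l => l.length
decreasing_by exact Nat.lt_succ_of_le (pvCollectA_len _ _)

-- A's loop = counting over pvRuns
theorem pvLoopA_runs : ∀ (s : List Int) (bc comp inc : Int),
    pvLoopA s bc comp inc =
      (bc + ((pvRuns s).length : Int),
       comp + (((pvRuns s).filter (fun L => L = 3)).length : Int),
       inc + (((pvRuns s).filter (fun L => L ≠ 3)).length : Int)) := by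
  intro s
  induction s using pvRuns.induct with
  | case1 => intro bc comp inc; simp [pvLoopA, pvRuns]
  | case2 x xs p ih =>
    intro bc comp inc
    have hp : p = pvCollectA x xs := rfl
    rw [pvLoopA, pvRuns]
    rw [← hp, ih]
    by_cases h3 : p.1 + 1 = 3 <;>
      simp [h3, Prod.ext_iff] <;> omega

-- the gap-flag list [x1-x0>=100, x2-x1>=100, …] (proof-only object)
def pvGapFlags : Int → List Int → List Bool
  | _, [] => []
  | prev, x :: xs => decide (x - prev ≥ 100) :: pvGapFlags x xs

theorem pvZipMap_eq : ∀ (xs : List Int) (x : Int),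
    ((x :: xs).zip xs).map (fun pr => decide (pr.2 - pr.1 ≥ 100)) = pvGapFlags x xs := by
  intro xs
  induction xs with
  | nil => intro x; rfl
  | cons y ys ih => intro x; simp only [List.zip_cons_cons, List.map_cons, pvGapFlags, ih]

-- sliding 4-window pattern counter, recursive form
def pvWin4 : List Bool → Nat
  | a :: b :: c :: d :: r => (if a && !b && !c && d then 1 else 0) + pvWin4 (b :: c :: d :: r)
  | _ => 0

theorem pvZip4_eq : ∀ (l : List Bool),
    ((l.zip (l.drop 1)).zip ((l.drop 2).zip (l.drop 3))).countP
      (fun q => q.1.1 && !q.1.2 && !q.2.1 && q.2.2) = pvWin4 l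
  | [] => rfl
  | [_] => rfl
  | [_, _] => rfl
  | [_, _, _] => rfl
  | a :: b :: c :: d :: r => by
    have ih := pvZip4_eq (b :: c :: d :: r)
    simp only [List.drop_succ_cons, List.drop_zero, List.zip_cons_cons, List.countP_cons,
      pvWin4] at *
    omega

theorem pvWin4_false_cons : ∀ (l : List Bool), pvWin4 (false :: l) = pvWin4 l
  | [] => rfl
  | [_] => rfl
  | [_, _] => rfl
  | _ :: _ :: _ :: _ => by simp [pvWin4]

theorem pvWin4_replicate : ∀ (k : Nat) (l : List Bool),
    pvWin4 (List.replicate k false ++ l) = pvWin4 l := by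
  intro k
  induction k with
  | zero => intro l; rfl
  | succ n ih => intro l; rw [List.replicate_succ, List.cons_append, pvWin4_false_cons, ih]

theorem pvWin4_block : ∀ (k : Nat) (l : List Bool),
    pvWin4 (true :: (List.replicate k false ++ true :: l)) =
      (if k = 2 then 1 else 0) + pvWin4 (true :: l) := by
  intro k l
  match k with
  | 0 =>
    match l with
    | [] => rfl
    | [_] => rfl
    | _ :: _ :: _ => simp [pvWin4]
  | 1 =>
    match l with
    | [] => rfl
    | c :: r => simp [pvWin4, List.replicate, pvWin4_false_cons]
  | 2 => simp [pvWin4, List.replicate, pvWin4_false_cons]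
  | (m + 3) =>
    simp only [List.replicate_succ, List.cons_append]
    rw [pvWin4]
    simp only [pvWin4_false_cons, pvWin4_replicate]
    simp

-- structure of the gap flags through A's inner collection
theorem pvGapFlags_collect : ∀ (l : List Int) (prev : Int),
    pvGapFlags prev l = List.replicate (pvCollectA prev l).1 false ++
      (match (pvCollectA prev l).2 with
       | [] => []
       | y :: ys => true :: pvGapFlags y ys) := by
  intro l
  induction l with
  | nil => intro prev; rfl
  | cons x xs ih =>
    intro prev
    simp only [pvGapFlags, pvCollectA]
    by_cases h : x - prev < 100
    · have h' : ¬ (x - prev ≥ 100) := by omega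
      rw [if_pos h, ih x]
      simp [h', List.replicate_succ]
    · have h' : x - prev ≥ 100 := by omega
      simp [h, h']

-- total: number of big markers = number of runs + 1
theorem pvCount_flags : ∀ (n : Nat) (xs : List Int), xs.length ≤ n → ∀ (x : Int),
    (pvGapFlags x xs).countP id + 1 = (pvRuns (x :: xs)).length := by
  intro n
  induction n with
  | zero =>
    intro xs h x
    cases xs with
    | nil => simp [pvGapFlags, pvRuns, pvCollectA]
    | cons a t => simp at h
  | succ n ih =>
    intro xs h x
    rw [pvRuns]
    rw [pvGapFlags_collect xs x]
    have hlen := pvCollectA_len xs x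
    have hz : List.countP id (List.replicate (pvCollectA x xs).1 false) = 0 :=
      List.countP_eq_zero.2 (by intro b hb; simp [List.eq_of_mem_replicate hb])
    cases hr : (pvCollectA x xs).2 with
    | nil =>
      simp [hz, pvRuns]
    | cons y ys =>
      have hys : ys.length ≤ n := by
        rw [hr] at hlen; simp at hlen; omega
      have hih := ih ys hys y
      simp only [List.countP_append, List.countP_cons, List.length_cons, hz, id] at hih ⊢
      simp only [if_true]
      omega

-- complete: window count = number of runs of length exactly 3
theorem pvWin_flags : ∀ (n : Nat) (xs : List Int), xs.length ≤ n → ∀ (x : Int),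
    pvWin4 (true :: pvGapFlags x xs ++ [true]) =
      ((pvRuns (x :: xs)).filter (fun L => L = 3)).length := by
  intro n
  induction n with
  | zero =>
    intro xs h x
    cases xs with
    | nil => simp [pvGapFlags, pvRuns, pvCollectA, pvWin4]
    | cons a t => simp at h
  | succ n ih =>
    intro xs h x
    rw [pvRuns, pvGapFlags_collect xs x]
    have hlen := pvCollectA_len xs x
    cases hr : (pvCollectA x xs).2 with
    | nil =>
      simp only [List.cons_append, List.append_nil]
      rw [pvWin4_block]
      by_cases h3 : (pvCollectA x xs).1 + 1 = 3
      · have : (pvCollectA x xs).1 = 2 := by omega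
        simp [this, pvRuns, pvWin4]
      · have : (pvCollectA x xs).1 ≠ 2 := by omega
        simp [this, pvRuns, pvWin4]
    | cons y ys =>
      have hys : ys.length ≤ n := by
        rw [hr] at hlen; simp at hlen; omega
      have ihy := ih ys hys y
      rw [List.cons_append] at ihy
      simp only [List.cons_append, List.append_assoc]
      rw [pvWin4_block, ihy]
      by_cases h3 : (pvCollectA x xs).1 + 1 = 3
      · have : (pvCollectA x xs).1 = 2 := by omega
        simp [this]
        omega
      · have : (pvCollectA x xs).1 ≠ 2 := by omega
        simp [this]

theorem pvFilter_split (l : List Nat) :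
    (l.filter (fun L => L ≠ 3)).length = l.length - (l.filter (fun L => L = 3)).length := by
  induction l with
  | nil => rfl
  | cons a t ih =>
    have hle : (t.filter (fun L => L = 3)).length ≤ t.length := List.length_filter_le _ _
    by_cases h : a = 3 <;> simp [h] at ih ⊢ <;> omega

theorem pvFilter_le (l : List Nat) :
    (l.filter (fun L => L = 3)).length ≤ l.length := List.length_filter_le _ _

theorem pvSorted_ne_nil {l : List Int} (h : l ≠ []) :
    PySem.List.sorted l (fun x => x) false ≠ [] := by
  intro hc
  exact h ((PySem.List.sorted_eq_nil_iff _ _ _).1 hc)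

-- one dict item: A's triple step matches B's pair step with third = first - second
theorem pvStep_eq (a b c : Int) (kv : (Int × Int) × List Int) (hc : c = a - b) :
    (if kv.2 = [] then ((a, b, c) : Int × Int × Int)
     else
       let s := PySem.List.sorted kv.2 (fun x => x) false
       let r := pvLoopA s 0 b c
       (a + r.1, r.2.1, r.2.2)) =
    (let q :=
      (if kv.2 = [] then ((a, b) : Int × Int)
       else
         let s := PySem.List.sorted kv.2 (fun x => x) false
         let big : List Bool := true :: (s.zip s.tail).map (fun pr => decide (pr.2 - pr.1 ≥ 100)) ++ [true]
         (a + ((big.countP id : Nat) : Int) - 1,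
          b + ((((big.zip (big.drop 1)).zip ((big.drop 2).zip (big.drop 3))).countP
                  (fun q => q.1.1 && !q.1.2 && !q.2.1 && q.2.2) : Nat) : Int)))
     (q.1, q.2, q.1 - q.2)) := by
  by_cases h : kv.2 = []
  · simp [h, hc]
  · simp only [h, if_neg, not_false_iff]
    obtain ⟨y, ys, hs⟩ : ∃ y ys, PySem.List.sorted kv.2 (fun x => x) false = y :: ys := by
      cases hx : PySem.List.sorted kv.2 (fun x => x) false with
      | nil => exact absurd hx (pvSorted_ne_nil h)
      | cons y ys => exact ⟨y, ys, rfl⟩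
    simp only [hs, List.tail_cons, pvZipMap_eq, pvZip4_eq, pvLoopA_runs]
    have hgf := pvCount_flags ys.length ys (Nat.le_refl _) y
    have hw := pvWin_flags ys.length ys (Nat.le_refl _) y
    have hc2 : List.countP id (true :: pvGapFlags y ys ++ [true])
        = List.countP id (pvGapFlags y ys) + 2 := by
      simp
    have hsplit := pvFilter_split (pvRuns (y :: ys))
    have hle := pvFilter_le (pvRuns (y :: ys))
    rw [hw]
    subst hc
    simp only [Prod.ext_iff]
    refine ⟨?_, ?_, ?_⟩
    · have hkey : List.countP id (true :: pvGapFlags y ys ++ [true]) = (pvRuns (y :: ys)).length + 1 := by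
        omega
      rw [hkey]; push_cast; ring
    · trivial
    · rw [hc2, hsplit, ← hgf]
      omega

-- the whole items fold, with the invariant third = first - second
theorem pvFold_eq : ∀ (items : List ((Int × Int) × List Int)) (a b : Int),
    items.foldl (fun st kv =>
      if kv.2 = [] then st
      else
        let s := PySem.List.sorted kv.2 (fun x => x) false
        let r := pvLoopA s 0 st.2.1 st.2.2
        (st.1 + r.1, r.2.1, r.2.2)) (a, b, a - b) =
    (let q := items.foldl (fun st kv =>
      if kv.2 = [] then st
      else
        let s := PySem.List.sorted kv.2 (fun x => x) false
        let big : List Bool := true :: (s.zip s.tail).map (fun pr => decide (pr.2 - pr.1 ≥ 100)) ++ [true]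
        (st.1 + ((big.countP id : Nat) : Int) - 1,
         st.2 + ((((big.zip (big.drop 1)).zip ((big.drop 2).zip (big.drop 3))).countP
                    (fun q => q.1.1 && !q.1.2 && !q.2.1 && q.2.2) : Nat) : Int))) (a, b)
     (q.1, q.2, q.1 - q.2)) := by
  intro items
  induction items with
  | nil => intro a b; rfl
  | cons kv t ih =>
    intro a b
    simp only [List.foldl_cons]
    rw [pvStep_eq a b (a - b) kv rfl]
    exact ih _ _

-- ===== VERDICT (by name: the statement is the Claim_ definition above) =====
theorem analyze_bursts_spec : Claim_equal_analyze_bursts := by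
  intro l _
  unfold Spec_analyze_bursts analyze_bursts analyze_bursts_alt
  have h := pvFold_eq
    ((l.foldl (fun d kv => d.insert (kv.1, kv.2.1) kv.2.2) PySem.Dict.empty).items) 0 0
  simp only [show (0 : Int) - 0 = 0 from rfl] at h
  dsimp only
  rw [h]
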